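-- pv_equiv track=rewrite | github.com/akhilpenugonda/160Days | CNP/Extract Unique Characters.py | uniqueChar
-- ===== SOURCE A (Python) =====
-- def uniqueChar(s):
--     dict = {}
--     resp = ""
--     for i in s:
--         if i not in dict:
--             dict[i] = 1
--             resp+=i
--     return resp
-- ===== SOURCE B (Python) =====
-- def uniqueChar(s):
--     if not s:
--         return ""
--     return s[0] + uniqueChar(s[1:].replace(s[0], ""))
-- ===== Notes on version B (the rewrite author's own statement) =====
-- stated objective: alternative
-- what changed: Replaced the one-pass seen-dict accumulation with a recursive head-and-filter algorithm: emit the first character, delete all its later occurrences with str.replace, and recurse on the shrunken remainder (no seen structure is ever maintained).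
import Mathlib
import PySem

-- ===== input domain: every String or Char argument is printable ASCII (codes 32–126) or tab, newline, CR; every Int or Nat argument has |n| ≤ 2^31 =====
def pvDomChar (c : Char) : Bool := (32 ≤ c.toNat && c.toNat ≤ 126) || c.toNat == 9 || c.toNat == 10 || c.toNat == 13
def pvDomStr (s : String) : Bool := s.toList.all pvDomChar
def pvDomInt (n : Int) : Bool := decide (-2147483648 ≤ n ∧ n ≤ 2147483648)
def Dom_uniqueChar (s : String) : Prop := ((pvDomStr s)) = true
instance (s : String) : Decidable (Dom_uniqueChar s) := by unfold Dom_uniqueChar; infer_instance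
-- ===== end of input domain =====

-- B replaces A's one-pass seen-dict loop by a recursive head-and-filter algorithm
-- (emit the head, delete all its later occurrences, recurse); alternative, not faster.


-- ===== PORT A =====
-- state: (dict, resp); resp kept as List Char, wrapped into a String at the end
def uniqueCharStep (st : PySem.Dict Char Int × List Char) (c : Char) :
    PySem.Dict Char Int × List Char :=
  if ¬ st.1.contains c then (st.1.insert c 1, st.2 ++ [c]) else st

def uniqueChar (s : String) : String :=
  String.mk ((s.toList.foldl uniqueCharStep (PySem.Dict.empty, [])).2)

-- ===== PORT B =====
-- if not s: return "";  return s[0] + uniqueChar(s[1:].replace(s[0], ""))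
-- s[1:].replace(c, "") on single characters is exactly filter (· ≠ c) over the tail.
def uniqueCharAltL : List Char → List Char
  | [] => []
  | c :: cs => c :: uniqueCharAltL (cs.filter (fun x => x ≠ c))
termination_by l => l.length
decreasing_by
  simp only [List.length_cons, List.length_unattach]
  exact Nat.lt_succ_of_le (le_trans (List.length_filter_le _ _) (by simp))

def uniqueChar_alt (s : String) : String :=
  String.mk (uniqueCharAltL s.toList)

-- ===== PRECONDITION & SPEC =====
def Spec_uniqueChar (s : String) (out : String) : Prop := out = uniqueChar_alt s
instance (s : String) (out : String) : Decidable (Spec_uniqueChar s out) := by unfold Spec_uniqueChar; infer_instance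

-- ===== CLAIM (what is proved, stated in full; the proofs are below) =====
def Claim_equal_uniqueChar : Prop := ∀ (s : String), Dom_uniqueChar s → Spec_uniqueChar s (uniqueChar s)

-- ===== LEMMAS AND PROOFS =====

/-- reference recursion: first-occurrence dedup with an explicit seen-dict -/
def uniqD (d : PySem.Dict Char Int) : List Char → List Char
  | [] => []
  | c :: cs => if d.contains c then uniqD d cs else c :: uniqD (d.insert c 1) cs

lemma foldA_spec (l : List Char) (d : PySem.Dict Char Int) (acc : List Char) :
    (l.foldl uniqueCharStep (d, acc)).2 = acc ++ uniqD d l := by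
  induction l generalizing d acc with
  | nil => simp [uniqD]
  | cons c cs ih =>
      simp only [List.foldl_cons, uniqueCharStep, uniqD]
      by_cases h : d.contains c <;> simp [h, ih]

lemma altL_nil : uniqueCharAltL [] = [] := by
  simp [uniqueCharAltL]

lemma altL_cons (c : Char) (cs : List Char) :
    uniqueCharAltL (c :: cs) = c :: uniqueCharAltL (cs.filter (fun x => x ≠ c)) := by
  simp [uniqueCharAltL]

lemma uniqD_eq_alt (l : List Char) (d : PySem.Dict Char Int) :
    uniqD d l = uniqueCharAltL (l.filter (fun x => ! d.contains x)) := by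
  induction l generalizing d with
  | nil => simp [uniqD, altL_nil]
  | cons c cs ih =>
      by_cases h : d.contains c
      · simp [uniqD, h, ih]
      · have hfilter :
            cs.filter (fun x => ! (d.insert c 1).contains x)
              = (cs.filter (fun x => ! d.contains x)).filter (fun x => x ≠ c) := by
          rw [List.filter_filter]
          apply List.filter_congr
          intro x _
          rw [PySem.Dict.contains_insert]
          by_cases hx : x = c <;> simp [hx, h]
        simp only [Bool.not_eq_true] at h
        simp [uniqD, h, altL_cons, hfilter, ih]

theorem uniqueChar_spec : Claim_equal_uniqueChar := by
  intro s _
  unfold Spec_uniqueChar uniqueChar uniqueChar_alt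
  rw [foldA_spec, uniqD_eq_alt]
  simp
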